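-- pv_equiv track=rewrite | github.com/mochilang/mochi | tests/leetcode/x/python/0683.py | solve
-- ===== SOURCE A (Python) =====
-- from math import inf
--
-- def solve(bulbs: list[int], k: int) -> int:
--     n = len(bulbs)
--     days = [0] * n
--     for day, bulb in enumerate(bulbs, 1):
--         days[bulb - 1] = day
--     ans = inf
--     left, right = 0, k + 1
--     while right < n:
--         valid = True
--         for i in range(left + 1, right):
--             if days[i] < max(days[left], days[right]):
--                 left = i
--                 right = i + k + 1
--                 valid = False
--                 break
--         if valid:
--             ans = min(ans, max(days[left], days[right]))
--             left = right
--             right = left + k + 1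
--     return -1 if ans == inf else ans
-- ===== SOURCE B (Python) =====
-- def solve(bulbs: list[int], k: int) -> int:
--     # Exhaustive window scan: for every window [x, x+k+1], if every slot strictly
--     # between blooms later than both endpoints, the window completes on day
--     # max(days[x], days[x+k+1]); answer is the minimum such day (-1 if none).
--     n = len(bulbs)
--     days = [0] * n
--     for day, bulb in enumerate(bulbs, 1):
--         days[bulb - 1] = day
--     best = None
--     for x in range(n - k - 1):
--         y = x + k + 1
--         m = days[x] if days[x] > days[y] else days[y]
--         if all(days[i] >= m for i in range(x + 1, y)):
--             if best is None or m < best: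
--                 best = m
--     return -1 if best is None else best
-- ===== Notes on version B (the rewrite author's own statement) =====
-- stated objective: alternative
-- what changed: Replaces A's stateful sliding window with restart jumps (left/right pointers advanced or reset on a failing interior slot, min folded into ans) by a direct exhaustive scan: for every window start x check all interior slots against the window value and take the minimum completing day.
-- outside the precondition, e.g. on solve([], -1): A returns -1, B returns -1
import Mathlib
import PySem

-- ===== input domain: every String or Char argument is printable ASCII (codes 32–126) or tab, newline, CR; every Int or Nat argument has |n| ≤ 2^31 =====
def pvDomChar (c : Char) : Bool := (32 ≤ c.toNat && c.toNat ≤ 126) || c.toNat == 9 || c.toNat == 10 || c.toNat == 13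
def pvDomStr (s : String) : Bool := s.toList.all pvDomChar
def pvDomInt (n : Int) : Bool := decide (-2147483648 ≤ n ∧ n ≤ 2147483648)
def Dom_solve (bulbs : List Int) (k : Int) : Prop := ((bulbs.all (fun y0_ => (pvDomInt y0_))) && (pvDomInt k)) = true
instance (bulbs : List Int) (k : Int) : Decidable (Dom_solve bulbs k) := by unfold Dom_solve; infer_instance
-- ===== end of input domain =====

-- B replaces A's sliding window (with restart jumps) by an exhaustive minimum over all windows:
-- a different algorithm of the same result, not faster (A is linear, B is O(n*k)).

-- ===== PORT A =====
-- shared helper: days[i] read (indices are in range whenever either Python reads them)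
def getAt (l : List Int) (i : Int) : Int := PySem.List.pyGetD l i 0

-- shared helper: the identical days-building pass of both Pythons
-- (days[bulb-1] = day for day, bulb in enumerate(bulbs, 1); in range under Pre_)
def mkDays (bulbs : List Int) : List Int :=
  (PySem.List.enumerate bulbs 1).foldl
    (fun d p => PySem.List.pySetD d (p.2 - 1) p.1)
    (List.replicate bulbs.length 0)

-- the inner 'for i in range(left+1, right): if days[i] < m: break' scan: first bad index
def findBad (days : List Int) (m : Int) : Int → Nat → Option Int
  | _, 0 => none
  | i, c + 1 => if getAt days i < m then some i else findBad days m (i + 1) c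

-- the while loop; fuel makes it total (A diverges only for k < 0, outside Pre_);
-- ans = inf is modelled as none
def loopA (days : List Int) (n k : Int) : Nat → Int → Int → Option Int → Option Int
  | 0, _, _, ans => ans
  | f + 1, left, right, ans =>
    if right < n then
      let m := max (getAt days left) (getAt days right)
      match findBad days m (left + 1) (right - (left + 1)).toNat with
      | some i => loopA days n k f i (i + k + 1) ans
      | none =>
          loopA days n k f right (right + k + 1)
            (some (match ans with | none => m | some a => min a m))
    else ans

def solve (bulbs : List Int) (k : Int) : Int :=
  let n : Int := bulbs.length
  let days := mkDays bulbs
  match loopA days n k (bulbs.length + 1) 0 (k + 1) none with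
  | none => -1
  | some a => a

-- ===== PORT B =====
-- all(days[i] >= m for i in range(i0, i0+c))
def allGE (days : List Int) (m : Int) : Int → Nat → Bool
  | _, 0 => true
  | i, c + 1 => decide (m ≤ getAt days i) && allGE days m (i + 1) c

-- one step of B's loop body for window start x
def stepB (days : List Int) (k : Int) (best : Option Int) (x : Int) : Option Int :=
  let y := x + k + 1
  let m := if getAt days x > getAt days y then getAt days x else getAt days y
  if allGE days m (x + 1) (y - (x + 1)).toNat then
    match best with
    | none => some m
    | some b => if m < b then some m else some b
  else best

def solve_alt (bulbs : List Int) (k : Int) : Int :=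
  let n : Int := bulbs.length
  let days := mkDays bulbs
  match (PySem.List.pyRange 0 (n - k - 1) 1).foldl (stepB days k) none with
  | none => -1
  | some b => b

-- ===== PRECONDITION & SPEC =====
-- Pre_ excludes exactly the inputs where A does not return normally: k < 0 (A loops forever on
-- any nonempty bulbs and hits an IndexError otherwise, except ([], -1) where both return -1),
-- and bulb values outside [1-n, n] (days[bulb-1] raises IndexError in both Pythons).
def Pre_solve (bulbs : List Int) (k : Int) : Prop :=
  0 ≤ k ∧ ∀ b ∈ bulbs, 1 - (bulbs.length : Int) ≤ b ∧ b ≤ (bulbs.length : Int)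
instance (bulbs : List Int) (k : Int) : Decidable (Pre_solve bulbs k) := by
  unfold Pre_solve; infer_instance

def pvWitness_solve : List Int × Int := ([3, 1, 2], 1)

def Spec_solve (bulbs : List Int) (k : Int) (out : Int) : Prop := out = solve_alt bulbs k
instance (bulbs : List Int) (k : Int) (out : Int) : Decidable (Spec_solve bulbs k out) := by
  unfold Spec_solve; infer_instance

-- ===== CLAIM (what is proved, stated in full; the proofs are below) =====
def Claim_equal_solve : Prop := ∀ (bulbs : List Int) (k : Int), Dom_solve bulbs k → Pre_solve bulbs k → Spec_solve bulbs k (solve bulbs k)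

-- ===== LEMMAS AND PROOFS =====

-- min of two optional values (inf = none)
def optMin : Option Int → Option Int → Option Int
  | none, b => b
  | some a, none => some a
  | some a, some b => some (min a b)

-- value of window starting at x: some (completing day) if the window qualifies, else none
def goodv (days : List Int) (k x : Int) : Option Int :=
  if allGE days (max (getAt days x) (getAt days (x + k + 1))) (x + 1) k.toNat
  then some (max (getAt days x) (getAt days (x + k + 1))) else none

-- minimum of goodv over c consecutive window starts from x
def mg (days : List Int) (k : Int) : Int → Nat → Option Int
  | _, 0 => none
  | x, c + 1 => optMin (goodv days k x) (mg days k (x + 1) c)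

lemma optMin_none_right (a : Option Int) : optMin a none = a := by cases a <;> rfl

lemma optMin_assoc (a b c : Option Int) :
    optMin (optMin a b) c = optMin a (optMin b c) := by
  cases a <;> cases b <;> cases c <;> simp [optMin, min_assoc]

lemma allGE_iff (days : List Int) (m : Int) :
    ∀ (c : Nat) (i : Int),
      allGE days m i c = true ↔ ∀ j : Int, i ≤ j → j < i + c → m ≤ getAt days j := by
  intro c
  induction c with
  | zero => intro i; simp [allGE]; intro j h1 h2; omega
  | succ c ih =>
      intro i
      simp only [allGE, Bool.and_eq_true, decide_eq_true_eq, ih (i + 1)]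
      constructor
      · rintro ⟨h0, hrest⟩ j h1 h2
        rcases eq_or_lt_of_le h1 with rfl | h
        · exact h0
        · exact hrest j (by omega) (by omega)
      · intro h
        refine ⟨h i le_rfl (by omega), fun j h1 h2 => ?_⟩
        exact h j (by omega) (by omega)

lemma findBad_eq_none_iff (days : List Int) (m : Int) :
    ∀ (c : Nat) (i : Int), findBad days m i c = none ↔ allGE days m i c = true := by
  intro c
  induction c with
  | zero => intro i; simp [findBad, allGE]
  | succ c ih =>
      intro i
      simp only [findBad, allGE, Bool.and_eq_true, decide_eq_true_eq]
      by_cases h : getAt days i < m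
      · rw [if_pos h]
        exact ⟨fun hh => (Option.some_ne_none _ hh).elim, fun hh => by omega⟩
      · rw [if_neg h, ih (i + 1)]
        exact ⟨fun hh => ⟨by omega, hh⟩, fun hh => hh.2⟩

lemma findBad_eq_some (days : List Int) (m : Int) :
    ∀ (c : Nat) (i j : Int), findBad days m i c = some j →
      i ≤ j ∧ j < i + c ∧ getAt days j < m ∧
        (∀ y : Int, i ≤ y → y < j → m ≤ getAt days y) := by
  intro c
  induction c with
  | zero => intro i j h; simp [findBad] at h
  | succ c ih =>
      intro i j h
      simp only [findBad] at h
      by_cases hb : getAt days i < m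
      · simp [hb] at h
        subst h
        exact ⟨le_rfl, by push_cast; omega, hb, fun y h1 h2 => by omega⟩
      · simp [hb] at h
        obtain ⟨h1, h2, h3, h4⟩ := ih (i + 1) j h
        refine ⟨by omega, by omega, h3, fun y hy1 hy2 => ?_⟩
        rcases eq_or_lt_of_le hy1 with rfl | hy
        · omega
        · exact h4 y (by omega) hy2

lemma mg_split (days : List Int) (k : Int) :
    ∀ (a b : Nat) (x : Int),
      mg days k x (a + b) = optMin (mg days k x a) (mg days k (x + a) b) := by
  intro a
  induction a with
  | zero => intro b x; simp [mg, optMin]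
  | succ a ih =>
      intro b x
      have : a + 1 + b = (a + b) + 1 := by omega
      rw [this]
      simp only [mg, ih b (x + 1), optMin_assoc]
      rw [show x + 1 + (a : Int) = x + ((a + 1 : Nat) : Int) by push_cast; ring]

lemma mg_none (days : List Int) (k : Int) :
    ∀ (c : Nat) (x : Int),
      (∀ j : Int, x ≤ j → j < x + c → goodv days k j = none) → mg days k x c = none := by
  intro c
  induction c with
  | zero => intro x _; rfl
  | succ c ih =>
      intro x h
      simp only [mg, h x le_rfl (by omega), optMin]
      exact ih (x + 1) (fun j h1 h2 => h j (by omega) (by omega))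

lemma optMin_absorb (days : List Int) (k m : Int) :
    ∀ (c : Nat) (x : Int),
      (∀ (j v : Int), x ≤ j → j < x + c → goodv days k j = some v → m ≤ v) →
      optMin (some m) (mg days k x c) = some m := by
  intro c
  induction c with
  | zero => intro x _; rfl
  | succ c ih =>
      intro x h
      have tail : optMin (some m) (mg days k (x + 1) c) = some m :=
        ih (x + 1) (fun j v h1 h2 hg => h j v (by omega) (by omega) hg)
      rw [mg, ← optMin_assoc]
      have head : optMin (some m) (goodv days k x) = some m := by
        cases hg : goodv days k x with
        | none => rfl
        | some v =>
            have := h x v le_rfl (by omega) hg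
            simp [optMin, min_eq_left this]
      rw [head, tail]

lemma goodv_some_ge (days : List Int) (k x v : Int) (h : goodv days k x = some v) :
    getAt days x ≤ v := by
  unfold goodv at h
  split at h
  · obtain rfl := Option.some.inj h
    exact le_max_left _ _
  · exact absurd h (by simp)

lemma goodv_none_of_bad (days : List Int) (k x i : Int) (hk : 0 ≤ k)
    (h1 : x < i) (h2 : i < x + k + 1)
    (hb : getAt days i < max (getAt days x) (getAt days (x + k + 1))) :
    goodv days k x = none := by
  unfold goodv
  split
  · next hall =>
      exfalso
      have := (allGE_iff days _ k.toNat (x + 1)).1 hall i (by omega) (by omega)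
      omega
  · rfl

-- A's loop computes the minimum of goodv over all window starts ≥ left
lemma loopA_eq (days : List Int) (n k : Int) (hk : 0 ≤ k) :
    ∀ (f : Nat) (left : Int) (ans : Option Int), (n - left).toNat < f →
      loopA days n k f left (left + k + 1) ans =
        optMin ans (mg days k left (n - k - 1 - left).toNat) := by
  intro f
  induction f with
  | zero => intro left ans h; omega
  | succ f ih =>
      intro left ans hfuel
      by_cases h : left + k + 1 < n
      · rw [loopA]
        simp only [h, if_true]
        have hcount : (left + k + 1 - (left + 1)).toNat = k.toNat := by omega
        cases hfb : findBad days (max (getAt days left) (getAt days (left + k + 1)))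
            (left + 1) (left + k + 1 - (left + 1)).toNat with
        | some i =>
            dsimp only
            rw [hcount] at hfb
            obtain ⟨hi1, hi2, hi3, hi4⟩ := findBad_eq_some days _ _ _ _ hfb
            have hi2' : i < left + k + 1 := by omega
            -- all goodv on [left, i) are none
            have hnone : ∀ j : Int, left ≤ j → j < i → goodv days k j = none := by
              intro j hj1 hj2
              by_cases hj : left = j
              · subst hj
                exact goodv_none_of_bad days k left i hk (by omega) (by omega) hi3
              · have hjs : left < j := by omega
                have hjm := hi4 j (by omega) hj2
                have hlt : i < j + k + 1 := by omega
                refine goodv_none_of_bad days k j i hk hj2 hlt ?_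
                have hle : getAt days j ≤ max (getAt days j) (getAt days (j + k + 1)) :=
                  le_max_left _ _
                omega
            rw [ih i ans (by omega)]
            congr 1
            -- mg from left equals mg from i
            by_cases hsmall : n - k - 1 - left ≤ i - left
            · have h0 : (n - k - 1 - i).toNat = 0 := by omega
              rw [h0]
              exact (mg_none days k (n - k - 1 - left).toNat left
                (fun j hj1 hj2 => hnone j hj1 (by omega))).symm
            · have hsplit : (n - k - 1 - left).toNat =
                  (i - left).toNat + (n - k - 1 - i).toNat := by omega
              rw [hsplit, mg_split,
                  mg_none days k (i - left).toNat left
                    (fun j hj1 hj2 => hnone j hj1 (by omega)),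
                  show left + ((i - left).toNat : Int) = i by omega]
              rfl
        | none =>
            dsimp only
            rw [hcount] at hfb
            have hall := (findBad_eq_none_iff days _ _ _).1 hfb
            have hge := (allGE_iff days _ k.toNat (left + 1)).1 hall
            set m := max (getAt days left) (getAt days (left + k + 1)) with hm
            have hgood : goodv days k left = some m := by
              unfold goodv; rw [← hm, if_pos hall]
            have habs : ∀ (j v : Int), left + 1 ≤ j → j < left + 1 + k.toNat →
                goodv days k j = some v → m ≤ v := by
              intro j v hj1 hj2 hg
              have := goodv_some_ge days k j v hg
              have := hge j hj1 hj2
              omega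
            rw [ih (left + k + 1) (some (match ans with | none => m | some a => min a m)) (by omega)]
            rw [show (some (match ans with | none => m | some a => min a m) : Option Int)
                = optMin ans (some m) from by cases ans <;> rfl]
            by_cases hsmall : n - k - 1 - left ≤ k + 1
            · have h0 : (n - k - 1 - (left + k + 1)).toNat = 0 := by omega
              rw [h0, show mg days k (left + k + 1) 0 = none from rfl, optMin_none_right]
              have hc : (n - k - 1 - left).toNat = ((n - k - 1 - left).toNat - 1) + 1 := by omega
              rw [hc, mg, hgood]
              congr 1
              exact (optMin_absorb days k m _ (left + 1)
                (fun j v hj1 hj2 hg => habs j v hj1 (by omega) hg)).symm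
            · have hsplit : (n - k - 1 - left).toNat =
                  (k.toNat + 1) + (n - k - 1 - (left + k + 1)).toNat := by omega
              rw [hsplit, mg_split, mg, hgood,
                  optMin_absorb days k m k.toNat (left + 1) habs,
                  show left + ((k.toNat + 1 : Nat) : Int) = left + k + 1 by push_cast; omega,
                  optMin_assoc]
      · rw [loopA]
        simp only [h, if_false]
        have h0 : (n - k - 1 - left).toNat = 0 := by omega
        rw [h0]
        exact (optMin_none_right ans).symm

-- B's fold step is optMin with goodv
lemma stepB_eq (days : List Int) (k : Int) (best : Option Int) (x : Int) :
    stepB days k best x = optMin best (goodv days k x) := by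
  simp only [stepB]
  unfold goodv
  have hm : (if getAt days x > getAt days (x + k + 1) then getAt days x
      else getAt days (x + k + 1)) = max (getAt days x) (getAt days (x + k + 1)) := by
    by_cases hgt : getAt days (x + k + 1) < getAt days x
    · rw [if_pos hgt]; exact (max_eq_left hgt.le).symm
    · rw [if_neg hgt]; exact (max_eq_right (not_lt.mp hgt)).symm
  have hc : (x + k + 1 - (x + 1)).toNat = k.toNat := by omega
  simp only [hm, hc]
  split
  · cases best with
    | none => rfl
    | some b =>
        simp only [optMin]
        by_cases hlt : max (getAt days x) (getAt days (x + k + 1)) < b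
        · rw [if_pos hlt, min_eq_right hlt.le]
        · rw [if_neg hlt, min_eq_left (not_lt.mp hlt)]
  · exact (optMin_none_right best).symm

-- B's fold over a range computes mg
lemma foldB_eq (days : List Int) (k : Int) :
    ∀ (c : Nat) (x : Int) (best : Option Int),
      (PySem.List.pyRange x (x + c) 1).foldl (stepB days k) best =
        optMin best (mg days k x c) := by
  intro c
  induction c with
  | zero =>
      intro x best
      rw [show x + ((0 : Nat) : Int) = x by push_cast; ring,
          PySem.List.pyRange_one_eq_nil le_rfl]
      exact (optMin_none_right best).symm
  | succ c ih =>
      intro x best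
      rw [PySem.List.pyRange_one_cons (by omega), List.foldl_cons, stepB_eq,
          show x + ((c + 1 : Nat) : Int) = (x + 1) + (c : Nat) by push_cast; ring,
          ih (x + 1), mg, ← optMin_assoc]

-- ===== VERDICT (by name: the statement is the Claim_ definition above) =====
theorem solve_spec : Claim_equal_solve := by
  intro bulbs k _ hpre
  obtain ⟨hk, _⟩ := hpre
  unfold Spec_solve
  simp only [solve, solve_alt]
  -- A side
  have hA := loopA_eq (mkDays bulbs) (bulbs.length : Int) k hk (bulbs.length + 1) 0 none
    (by omega)
  rw [show (0 : Int) + k + 1 = k + 1 by ring] at hA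
  rw [hA]
  -- B side
  have hB : (PySem.List.pyRange 0 ((bulbs.length : Int) - k - 1) 1).foldl
        (stepB (mkDays bulbs) k) none =
      optMin none (mg (mkDays bulbs) k 0 ((bulbs.length : Int) - k - 1).toNat) := by
    by_cases hpos : 0 ≤ (bulbs.length : Int) - k - 1
    · have hfold := foldB_eq (mkDays bulbs) k ((bulbs.length : Int) - k - 1).toNat 0 none
      rw [show (0 : Int) + (((bulbs.length : Int) - k - 1).toNat : Int)
          = (bulbs.length : Int) - k - 1 by omega] at hfold
      exact hfold
    · rw [PySem.List.pyRange_one_eq_nil (by omega),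
          show ((bulbs.length : Int) - k - 1).toNat = 0 by omega]
      rfl
  rw [hB, show (bulbs.length : Int) - k - 1 - 0 = (bulbs.length : Int) - k - 1 by ring]
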